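-- pv_equiv track=rewrite | github.com/Relaxed-System-Lab/HexGen | hexgen/hexgen_core/gen_hetero_groups.py | gen_tp_rank_groups
-- ===== SOURCE A (Python) =====
-- def gen_tp_rank_groups(hetero_config):
--     tp_rank_groups = []
--     current_tp_rank = 0
--     for tp_rank in hetero_config:
--         new_tp_group = []
--         for _ in range(tp_rank):
--             new_tp_group.append(current_tp_rank)
--             current_tp_rank += 1
--         tp_rank_groups.append(new_tp_group)
--     return tp_rank_groups
-- ===== SOURCE B (Python) =====
-- def gen_tp_rank_groups(hetero_config):
--     # Pass 1: group boundaries as a running prefix sum (negative sizes count as 0,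
--     # matching range()'s empty iteration).
--     bounds = [0]
--     for size in hetero_config:
--         bounds.append(bounds[-1] + max(size, 0))
--     # Pass 2: each group is the consecutive range between adjacent boundaries.
--     return [list(range(start, end)) for start, end in zip(bounds, bounds[1:])]
-- ===== Notes on version B (the rewrite author's own statement) =====
-- stated objective: alternative
-- what changed: Replaces A's single pass with a per-element incrementing counter and inner append loop by two passes: first compute group boundaries as a running prefix sum, then build each group directly as list(range(start, end)) over adjacent boundary pairs.
import Mathlib
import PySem

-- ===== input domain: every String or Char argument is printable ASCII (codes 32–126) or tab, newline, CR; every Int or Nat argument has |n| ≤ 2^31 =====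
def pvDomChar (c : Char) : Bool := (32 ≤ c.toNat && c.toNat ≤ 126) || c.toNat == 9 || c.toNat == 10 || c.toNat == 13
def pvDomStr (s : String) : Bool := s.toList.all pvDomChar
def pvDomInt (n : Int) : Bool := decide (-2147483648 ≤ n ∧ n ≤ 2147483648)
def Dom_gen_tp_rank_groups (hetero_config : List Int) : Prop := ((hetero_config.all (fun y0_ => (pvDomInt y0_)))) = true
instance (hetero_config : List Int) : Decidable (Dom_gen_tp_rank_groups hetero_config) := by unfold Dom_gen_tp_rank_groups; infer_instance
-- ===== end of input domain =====

-- B replaces A's per-element counter loop by a boundary pass (prefix sums) plus a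
-- range-per-boundary-pair pass: a different decomposition, same exact output.

-- ===== PORT A =====
-- inner 'for _ in range(tp_rank)' loop: appends the counter n times (range(tp_rank)
-- iterates tp_rank.toNat times, 0 when negative)
def pvInnerA (n : Nat) (group : List Int) (current : Int) : List Int × Int :=
  match n with
  | 0 => (group, current)
  | m + 1 => pvInnerA m (group ++ [current]) (current + 1)

def gen_tp_rank_groups (hetero_config : List Int) : List (List Int) :=
  (hetero_config.foldl
    (fun (st : List (List Int) × Int) tp_rank =>
      let r := pvInnerA tp_rank.toNat [] st.2
      (st.1 ++ [r.1], r.2))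
    ([], 0)).1

-- ===== PORT B =====
-- pass 1 of Source B: bounds = [0]; for size: bounds.append(bounds[-1] + max(size, 0))
def pvBoundsB (hetero_config : List Int) : List Int :=
  hetero_config.foldl (fun bounds size => bounds ++ [bounds.getLastD 0 + max size 0]) [0]

def gen_tp_rank_groups_alt (hetero_config : List Int) : List (List Int) :=
  let bounds := pvBoundsB hetero_config
  (bounds.zip (bounds.drop 1)).map (fun p => PySem.List.pyRange p.1 p.2 1)

-- ===== PRECONDITION & SPEC =====
def Spec_gen_tp_rank_groups (hetero_config : List Int) (out : List (List Int)) : Prop := out = gen_tp_rank_groups_alt hetero_config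
instance (hetero_config : List Int) (out : List (List Int)) : Decidable (Spec_gen_tp_rank_groups hetero_config out) := by unfold Spec_gen_tp_rank_groups; infer_instance

-- ===== CLAIM (what is proved, stated in full; the proofs are below) =====
def Claim_equal_gen_tp_rank_groups : Prop := ∀ (hetero_config : List Int), Dom_gen_tp_rank_groups hetero_config → Spec_gen_tp_rank_groups hetero_config (gen_tp_rank_groups hetero_config)

-- ===== LEMMAS AND PROOFS =====

-- common reference function: groups of consecutive ints, starting at c
def pvRef (hc : List Int) (c : Int) : List (List Int) :=
  match hc with
  | [] => []
  | s :: r => PySem.List.pyRange c (c + max s 0) 1 :: pvRef r (c + max s 0)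

-- A side --

theorem pvInnerA_eq (n : Nat) (g : List Int) (c : Int) :
    pvInnerA n g c = (g ++ PySem.List.pyRange c (c + n) 1, c + n) := by
  induction n generalizing g c with
  | zero => simp [pvInnerA, PySem.List.pyRange_one_eq_nil]
  | succ m ih =>
    rw [pvInnerA, ih]
    push_cast
    rw [PySem.List.pyRange_one_cons (show c < c + ((m : Int) + 1) by omega)]
    simp only [Prod.mk.injEq]
    refine ⟨?_, by ring⟩
    rw [show c + ((m : Int) + 1) = c + 1 + (m : Int) from by ring]
    simp

theorem pvA_fold (hc : List Int) (acc : List (List Int)) (c : Int) :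
    hc.foldl
      (fun (st : List (List Int) × Int) tp_rank =>
        let r := pvInnerA tp_rank.toNat [] st.2
        (st.1 ++ [r.1], r.2))
      (acc, c)
    = (acc ++ pvRef hc c, c + ((hc.map (fun s => max s 0)).sum)) := by
  induction hc generalizing acc c with
  | nil => simp [pvRef]
  | cons s r ih =>
    rw [List.foldl_cons]
    have hstep : (let rr := pvInnerA s.toNat [] ((acc, c) : List (List Int) × Int).2
        (((acc, c) : List (List Int) × Int).1 ++ [rr.1], rr.2))
        = (acc ++ [PySem.List.pyRange c (c + max s 0) 1], c + max s 0) := by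
      simp only [pvInnerA_eq, List.nil_append, Int.toNat_eq_max]
    rw [hstep, ih]
    simp only [pvRef, Prod.mk.injEq, List.map_cons, List.sum_cons]
    refine ⟨by simp, by ring⟩

-- B side --

-- the boundary values appended after the initial 0
def pvBoundsTail (hc : List Int) (c : Int) : List Int :=
  match hc with
  | [] => []
  | s :: r => (c + max s 0) :: pvBoundsTail r (c + max s 0)

theorem pvBoundsB_fold (hc : List Int) (pre : List Int) (c : Int) :
    hc.foldl (fun bounds size => bounds ++ [bounds.getLastD 0 + max size 0]) (pre ++ [c])
    = pre ++ [c] ++ pvBoundsTail hc c := by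
  induction hc generalizing pre c with
  | nil => simp [pvBoundsTail]
  | cons s r ih =>
    simp only [List.foldl_cons, pvBoundsTail]
    have hl : (pre ++ [c]).getLastD 0 = c := by simp
    rw [hl]
    have := ih (pre ++ [c]) (c + max s 0)
    simpa [List.append_assoc] using this

theorem pvZipTail (hc : List Int) (c : Int) :
    ((c :: pvBoundsTail hc c).zip (pvBoundsTail hc c)).map
      (fun p => PySem.List.pyRange p.1 p.2 1) = pvRef hc c := by
  induction hc generalizing c with
  | nil => simp [pvBoundsTail, pvRef]
  | cons s r ih =>
    simp only [pvBoundsTail, pvRef, List.zip_cons_cons, List.map_cons]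
    rw [ih]

theorem pvAlt_eq (hc : List Int) : gen_tp_rank_groups_alt hc = pvRef hc 0 := by
  unfold gen_tp_rank_groups_alt pvBoundsB
  have hb : hc.foldl (fun bounds size => bounds ++ [bounds.getLastD 0 + max size 0]) [0]
      = [] ++ [0] ++ pvBoundsTail hc 0 := pvBoundsB_fold hc [] 0
  simp only [List.nil_append, List.singleton_append] at hb
  simp only [hb, List.drop_succ_cons, List.drop_zero]
  exact pvZipTail hc 0

-- ===== VERDICT (by name: the statement is the Claim_ definition above) =====
theorem gen_tp_rank_groups_spec : Claim_equal_gen_tp_rank_groups := by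
  intro hc _
  unfold Spec_gen_tp_rank_groups gen_tp_rank_groups
  rw [pvAlt_eq]
  have := pvA_fold hc [] 0
  rw [this]
  simp
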